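-- pv_equiv track=rewrite | github.com/TiMeLeSsWorld00/ASCPD | module3/src/inverted_index.py | delta_decompress
-- ===== SOURCE A (Python) =====
-- from typing import List
--
-- def delta_decompress(com_numbers: int) -> List[int]:
--     numbers = []
--
--     bitstream = list(format(com_numbers, 'b'))
--     bitstream.reverse()
--
--     read_zeros = True
--     N = 1
--     M = None
--     number_N = []
--     number = ['1']
--     previous_number = 0
--     for bit in bitstream:
--         if read_zeros:
--             if bit == '0':
--                 N += 1
--                 continue
--             else:
--                 read_zeros = False
--         if M is None:
--             number_N.append(bit)
--             N -= 1
--         else: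
--             number.append(bit)
--             M -= 1
--         if N == 0:
--             if M is None:
--                 M = int(''.join(number_N), 2) - 1
--             if M == 0:
--                 read_zeros = True
--                 N = 1
--                 M = None
--                 numbers.append(previous_number + int(''.join(number), 2))
--                 previous_number = numbers[-1]
--                 number_N = []
--                 number = ['1']
--
--     return numbers
-- ===== SOURCE B (Python) =====
-- from typing import List
--
-- def delta_decompress(com_numbers: int) -> List[int]:
--     bits = list(format(com_numbers, 'b'))
--     bits.reverse()
--     n = len(bits)
--     numbers: List[int] = []
--     prev = 0
--     i = 0
--     while True:
--         zeros = 0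
--         while i < n and bits[i] == '0':
--             zeros += 1
--             i += 1
--         L = zeros + 1                   # length of the length-code, incl. its leading '1'
--         if i + L > n:
--             break                       # truncated (or all-zeros) tail: nothing more to emit
--         value_bits = int(''.join(bits[i:i + L]), 2) - 1
--         i += L
--         if i + value_bits > n:
--             break                       # not enough bits left for the value
--         prev += int(''.join(['1'] + bits[i:i + value_bits]), 2)
--         i += value_bits
--         numbers.append(prev)
--     return numbers
-- ===== Notes on version B (the rewrite author's own statement) =====
-- stated objective: simpler
-- what changed: A's per-bit seven-variable state machine (read_zeros/N/M/number_N/number flags threaded through one fold over every bit) is replaced by a per-number loop that counts the zero run, slices the length code and the value bits out of the list, and emits one decoded number per iteration.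
-- outside the precondition, e.g. on delta_decompress(-199): A returns [1, 2, 3], B returns [1, 2, 3]; on delta_decompress(-1): A raises ValueError, B raises ValueError
import Mathlib
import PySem

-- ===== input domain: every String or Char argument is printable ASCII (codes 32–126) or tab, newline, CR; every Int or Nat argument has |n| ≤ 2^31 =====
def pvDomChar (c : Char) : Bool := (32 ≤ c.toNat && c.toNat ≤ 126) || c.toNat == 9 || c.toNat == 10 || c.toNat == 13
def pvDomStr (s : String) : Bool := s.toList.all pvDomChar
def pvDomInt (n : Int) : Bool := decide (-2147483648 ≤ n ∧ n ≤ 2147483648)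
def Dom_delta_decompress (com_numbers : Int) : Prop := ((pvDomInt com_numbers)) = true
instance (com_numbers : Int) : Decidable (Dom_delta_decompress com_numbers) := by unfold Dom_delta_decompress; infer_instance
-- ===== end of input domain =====

-- B replaces A's per-bit state machine by an index-free per-number decode loop (count zeros, slice the
-- length code, slice the value bits); objective: simpler. Negative inputs (the '-' sign character enters
-- the bitstream) are outside Pre_.


-- ===== PORT A =====
-- int(''.join(cs), 2): exact on the nonempty '0'/'1' digit lists that are the only arguments
-- reachable under Pre_ (PySem.Int.ofCharsBase? carries whitespace/sign/prefix handling that is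
-- unreachable here and opaque private helpers, so the binary-digit fold is written out).
def binVal (cs : List Char) : Int :=
  cs.foldl (fun a c => 2 * a + (if c = '1' then 1 else 0)) 0

structure StA where
  nums : List Int
  rz : Bool
  N : Int
  M : Option Int
  nN : List Char
  num : List Char
  prev : Int
deriving Repr, DecidableEq

-- one iteration of A's `for bit in bitstream` body
def stepA (s : StA) (bit : Char) : StA :=
  if s.rz ∧ bit = '0' then { s with N := s.N + 1 }     -- the `continue` branch
  else
    let s1 : StA := { s with rz := false }
    let s2 : StA :=
      match s1.M with
      | none => { s1 with nN := s1.nN ++ [bit], N := s1.N - 1 }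
      | some m => { s1 with num := s1.num ++ [bit], M := some (m - 1) }
    if s2.N = 0 then
      let M' : Option Int := match s2.M with
        | none => some (binVal s2.nN - 1)
        | some m => some m
      if M' = some 0 then
        let v := s2.prev + binVal s2.num
        { nums := s2.nums ++ [v], rz := true, N := 1, M := none, nN := [], num := ['1'], prev := v }
      else { s2 with M := M' }
    else s2

def delta_decompress (com_numbers : Int) : List Int :=
  let bitstream := (PySem.Int.toBinChars com_numbers).reverse
  (bitstream.foldl stepA ⟨[], true, 1, none, [], ['1'], 0⟩).nums

-- ===== PORT B =====
-- the inner `while i < n and bits[i] == '0'` zero-counting loop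
def countZeros : List Char → Nat
  | [] => 0
  | c :: t => if c = '0' then countZeros t + 1 else 0

-- the outer `while True` loop of B, one decoded number per call
def decodeB (bits : List Char) (prev : Int) : List Int :=
  let z := countZeros bits
  let rest := bits.drop z
  if rest.length < z + 1 then []
  else
    let code := rest.take (z + 1)
    let rest2 := rest.drop (z + 1)
    let vb := binVal code - 1
    if (rest2.length : Int) < vb then []
    else
      let v := prev + binVal ('1' :: rest2.take vb.toNat)
      v :: decodeB (rest2.drop vb.toNat) v
termination_by bits.length
decreasing_by
  simp only [List.length_drop]
  have h1 : ¬ (bits.drop (countZeros bits)).length < countZeros bits + 1 := by assumption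
  simp only [List.length_drop] at h1
  omega

def delta_decompress_alt (com_numbers : Int) : List Int :=
  decodeB ((PySem.Int.toBinChars com_numbers).reverse) 0

-- ===== PRECONDITION & SPEC =====
-- Pre_ keeps the decoder on its natural domain, non-negative inputs: on negatives format's '-' sign
-- character enters the bitstream and A raises ValueError (int('…-…', 2)) on about half of them,
-- returning an accidental prefix-decode on the rest.
def Pre_delta_decompress (com_numbers : Int) : Prop := 0 ≤ com_numbers
instance (com_numbers : Int) : Decidable (Pre_delta_decompress com_numbers) := by
  unfold Pre_delta_decompress; infer_instance
def pvWitness_delta_decompress : Int := (1241)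

def Spec_delta_decompress (com_numbers : Int) (out : List Int) : Prop := out = delta_decompress_alt com_numbers
instance (com_numbers : Int) (out : List Int) : Decidable (Spec_delta_decompress com_numbers out) := by unfold Spec_delta_decompress; infer_instance

-- ===== CLAIM (what is proved, stated in full; the proofs are below) =====
def Claim_equal_delta_decompress : Prop := ∀ (com_numbers : Int), Dom_delta_decompress com_numbers → Pre_delta_decompress com_numbers → Spec_delta_decompress com_numbers (delta_decompress com_numbers)

-- ===== LEMMAS AND PROOFS =====

theorem binVal_ge_one (l : List Char) : ∀ a : Int, 1 ≤ a →
    1 ≤ l.foldl (fun a c => 2 * a + (if c = '1' then 1 else 0)) a := by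
  induction l with
  | nil => intro a ha; simpa using ha
  | cons c t ih =>
    intro a ha
    simp only [List.foldl_cons]
    exact ih _ (by split_ifs <;> omega)

theorem binVal_one_cons (l : List Char) : 1 ≤ binVal ('1' :: l) := by
  simpa [binVal] using binVal_ge_one l 1 le_rfl

theorem countZeros_replicate_append (z : Nat) (t : List Char) :
    countZeros (List.replicate z '0' ++ '1' :: t) = z := by
  induction z with
  | zero => simp [countZeros]
  | succ k ih => simpa [List.replicate_succ, countZeros] using ih

theorem countZeros_replicate (z : Nat) : countZeros (List.replicate z '0') = z := by
  induction z with
  | zero => simp [countZeros]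
  | succ k ih => simpa [List.replicate_succ, countZeros] using ih

theorem stepA_true_of_ne (nums : List Int) (N : Int) (M : Option Int) (nN num : List Char)
    (prev : Int) (b : Char) (hb : b ≠ '0') :
    stepA ⟨nums, true, N, M, nN, num, prev⟩ b = stepA ⟨nums, false, N, M, nN, num, prev⟩ b := by
  simp [stepA, hb]

theorem stepA_code (nums : List Int) (N : Int) (nN num : List Char) (prev : Int) (c : Char)
    (hN : ¬ (N - 1 = 0)) :
    stepA ⟨nums, false, N, none, nN, num, prev⟩ c
      = ⟨nums, false, N - 1, none, nN ++ [c], num, prev⟩ := by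
  simp [stepA, hN]

theorem stepA_code_last (nums : List Int) (nN num : List Char) (prev : Int) (c : Char) :
    stepA ⟨nums, false, 1, none, nN, num, prev⟩ c
      = (if binVal (nN ++ [c]) - 1 = 0 then
           ⟨nums ++ [prev + binVal num], true, 1, none, [], ['1'], prev + binVal num⟩
         else ⟨nums, false, 0, some (binVal (nN ++ [c]) - 1), nN ++ [c], num, prev⟩) := by
  simp [stepA]

theorem stepA_val (nums : List Int) (m : Int) (nN num : List Char) (prev : Int) (c : Char)
    (hm : ¬ (m - 1 = 0)) :
    stepA ⟨nums, false, 0, some m, nN, num, prev⟩ c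
      = ⟨nums, false, 0, some (m - 1), nN, num ++ [c], prev⟩ := by
  simp [stepA, hm]

theorem stepA_val_last (nums : List Int) (nN num : List Char) (prev : Int) (c : Char) :
    stepA ⟨nums, false, 0, some 1, nN, num, prev⟩ c
      = ⟨nums ++ [prev + binVal (num ++ [c])], true, 1, none, [], ['1'],
         prev + binVal (num ++ [c])⟩ := by
  simp [stepA]

theorem phase2_partial (code : List Char) : ∀ (nums : List Int) (N : Int) (nN num : List Char)
    (prev : Int), (code.length : Int) < N →
    code.foldl stepA ⟨nums, false, N, none, nN, num, prev⟩
      = ⟨nums, false, N - code.length, none, nN ++ code, num, prev⟩ := by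
  induction code with
  | nil => intro nums N nN num prev _; simp
  | cons c cs ih =>
    intro nums N nN num prev h
    simp only [List.length_cons] at h
    rw [List.foldl_cons, stepA_code nums N nN num prev c (by push_cast at h ⊢; omega),
      ih nums (N - 1) (nN ++ [c]) num prev (by push_cast at h ⊢; omega)]
    congr 1
    · simp only [List.length_cons]; push_cast; ring
    · simp

theorem phase2_full (code : List Char) : ∀ (rest : List Char) (nums : List Int)
    (nN num : List Char) (prev : Int), code ≠ [] →
    (code ++ rest).foldl stepA ⟨nums, false, (code.length : Int), none, nN, num, prev⟩
      = (if binVal (nN ++ code) - 1 = 0 then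
          rest.foldl stepA ⟨nums ++ [prev + binVal num], true, 1, none, [], ['1'],
            prev + binVal num⟩
        else
          rest.foldl stepA ⟨nums, false, 0, some (binVal (nN ++ code) - 1), nN ++ code, num,
            prev⟩) := by
  induction code with
  | nil => intro _ _ _ _ _ h; exact absurd rfl h
  | cons c cs ih =>
    intro rest nums nN num prev _
    rcases cs with _ | ⟨c2, cs'⟩
    · -- last code bit: N reaches 0, M is computed
      have h1 : (([c].length : Nat) : Int) = 1 := by simp
      rw [List.singleton_append, List.foldl_cons, h1, stepA_code_last]
      split_ifs <;> rfl
    · -- more code bits remain: N stays positive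
      have hN : ¬ (((c :: c2 :: cs').length : Int) - 1 = 0) := by
        simp only [List.length_cons]; push_cast; omega
      rw [List.cons_append, List.foldl_cons,
        stepA_code nums ((c :: c2 :: cs').length : Int) nN num prev c hN]
      have hlen : ((c :: c2 :: cs').length : Int) - 1 = ((c2 :: cs').length : Int) := by
        simp only [List.length_cons]; push_cast; ring
      rw [hlen, ih rest nums (nN ++ [c]) num prev (by simp)]
      simp [List.append_assoc]

theorem phase3_partial (seg : List Char) : ∀ (nums : List Int) (m : Int) (nN num : List Char)
    (prev : Int), (seg.length : Int) < m →
    seg.foldl stepA ⟨nums, false, 0, some m, nN, num, prev⟩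
      = ⟨nums, false, 0, some (m - seg.length), nN, num ++ seg, prev⟩ := by
  induction seg with
  | nil => intro nums m nN num prev _; simp
  | cons c cs ih =>
    intro nums m nN num prev h
    simp only [List.length_cons] at h
    rw [List.foldl_cons, stepA_val nums m nN num prev c (by push_cast at h ⊢; omega),
      ih nums (m - 1) nN (num ++ [c]) prev (by push_cast at h ⊢; omega)]
    congr 1
    · simp only [List.length_cons]; push_cast; ring_nf
    · simp

theorem phase3_full (seg : List Char) : ∀ (rest : List Char) (nums : List Int) (m : Int)
    (nN num : List Char) (prev : Int), (seg.length : Int) = m → 1 ≤ m →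
    (seg ++ rest).foldl stepA ⟨nums, false, 0, some m, nN, num, prev⟩
      = rest.foldl stepA ⟨nums ++ [prev + binVal (num ++ seg)], true, 1, none, [], ['1'],
          prev + binVal (num ++ seg)⟩ := by
  induction seg with
  | nil => intro rest nums m nN num prev h h1; simp at h; omega
  | cons c cs ih =>
    intro rest nums m nN num prev hlen hm
    simp only [List.length_cons] at hlen
    rcases cs with _ | ⟨c2, cs'⟩
    · have hm1 : m = 1 := by simpa using hlen.symm
      subst hm1
      rw [List.singleton_append, List.foldl_cons, stepA_val_last]
    · have hm2 : ¬ (m - 1 = 0) := by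
        simp only [List.length_cons] at hlen; omega
      rw [List.cons_append, List.foldl_cons, stepA_val nums m nN num prev c hm2,
        ih rest nums (m - 1) nN (num ++ [c]) prev
          (by simp only [List.length_cons] at hlen ⊢; push_cast at hlen ⊢; omega)
          (by omega)]
      simp [List.append_assoc]

-- main invariant: from a fresh reading-zeros state with N = 1 + z (z zeros already consumed),
-- A's fold over the remaining bits equals B's decode of (replicate z '0' ++ bits)
theorem mainA (n : Nat) : ∀ (bits : List Char), bits.length ≤ n →
    (∀ c ∈ bits, c = '0' ∨ c = '1') → ∀ (z : Nat) (nums : List Int) (prev : Int),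
    (bits.foldl stepA ⟨nums, true, 1 + (z : Int), none, [], ['1'], prev⟩).nums
      = nums ++ decodeB (List.replicate z '0' ++ bits) prev := by
  induction n with
  | zero =>
    intro bits hlen _ z nums prev
    have hb : bits = [] := List.length_eq_zero_iff.mp (Nat.le_zero.mp hlen)
    subst hb
    rw [decodeB]
    simp [countZeros_replicate]
  | succ k ih =>
    intro bits hlen hbits z nums prev
    rcases bits with _ | ⟨b, t⟩
    · rw [decodeB]; simp [countZeros_replicate]
    · rcases hbits b (List.mem_cons_self) with hb | hb
      · -- a further zero: absorb it into z
        subst hb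
        have h1 : stepA ⟨nums, true, 1 + (z : Int), none, [], ['1'], prev⟩ '0'
            = ⟨nums, true, 1 + ((z + 1 : Nat) : Int), none, [], ['1'], prev⟩ := by
          simp [stepA]; ring
        rw [List.foldl_cons, h1,
          ih t (by simpa using hlen) (fun c hc => hbits c (List.mem_cons_of_mem _ hc))
            (z + 1) nums prev]
        congr 1
        rw [List.replicate_succ' (n := z)]
        simp
      · -- the stopping '1': decode one number
        subst hb
        have hrw : ('1' :: t).foldl stepA ⟨nums, true, 1 + (z : Int), none, [], ['1'], prev⟩
            = ('1' :: t).foldl stepA ⟨nums, false, 1 + (z : Int), none, [], ['1'], prev⟩ := by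
          simp only [List.foldl_cons]
          rw [stepA_true_of_ne nums (1 + (z : Int)) none [] ['1'] prev '1' (by decide)]
        rw [hrw]
        by_cases hz : t.length < z
        · -- not enough bits for the length code
          rw [phase2_partial ('1' :: t) nums (1 + (z : Int)) [] ['1'] prev
            (by simp only [List.length_cons]; push_cast; omega)]
          rw [decodeB]
          simp [countZeros_replicate_append, List.drop_left' (by simp : (List.replicate z '0').length = z)]
          omega
        · -- full length code '1' :: take z t
          rw [not_lt] at hz
          have hsplit : ('1' :: t) = ('1' :: t.take z) ++ t.drop z := by simp
          have hcode : (('1' :: t.take z).length : Int) = 1 + (z : Int) := by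
            simp [List.length_take, Nat.min_eq_left hz]; ring
          have hfold2 : ('1' :: t).foldl stepA
              ⟨nums, false, 1 + (z : Int), none, [], ['1'], prev⟩
              = (if binVal ([] ++ ('1' :: t.take z)) - 1 = 0 then
                  (t.drop z).foldl stepA ⟨nums ++ [prev + binVal ['1']], true, 1, none, [],
                    ['1'], prev + binVal ['1']⟩
                else
                  (t.drop z).foldl stepA ⟨nums, false, 0,
                    some (binVal ([] ++ ('1' :: t.take z)) - 1), [] ++ ('1' :: t.take z),
                    ['1'], prev⟩) := by
            conv_lhs => rw [hsplit, ← hcode]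
            exact phase2_full ('1' :: t.take z) (t.drop z) nums [] ['1'] prev (by simp)
          rw [hfold2]
          have hd : decodeB (List.replicate z '0' ++ '1' :: t) prev
              = (if (((t.drop z).length : Int)) < binVal ('1' :: t.take z) - 1 then []
                 else
                   let v := prev + binVal ('1' :: (t.drop z).take (binVal ('1' :: t.take z) - 1).toNat)
                   v :: decodeB ((t.drop z).drop (binVal ('1' :: t.take z) - 1).toNat) v) := by
            rw [decodeB]
            have hz' : countZeros (List.replicate z '0' ++ '1' :: t) = z :=
              countZeros_replicate_append z t
            have hdrop : (List.replicate z '0' ++ '1' :: t).drop z = '1' :: t := by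
              exact List.drop_left' (by simp)
            simp only [hz', hdrop]
            have hnot : ¬ (('1' :: t).length < z + 1) := by
              simp only [List.length_cons]; omega
            simp only [hnot, if_false, List.take_succ_cons, List.drop_succ_cons,
              List.length_drop]
          set m : Int := binVal ('1' :: t.take z) - 1 with hm
          have hm0 : 0 ≤ m := by have := binVal_one_cons (t.take z); omega
          have hlen' : t.length ≤ k := by
            simp only [List.length_cons] at hlen; omega
          by_cases hc : m = 0
          · -- value fits in the stopping bit alone
            simp only [List.nil_append, ← hm]
            rw [if_pos hc]
            have hih := ih (t.drop z) (by simp only [List.length_drop]; omega)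
              (fun c hc' => hbits c (List.mem_cons_of_mem _ (List.mem_of_mem_drop hc'))) 0
              (nums ++ [prev + binVal ['1']]) (prev + binVal ['1'])
            norm_num at hih
            rw [hih, hd]
            have hnlt : ¬ (((t.drop z).length : Int) < m) := by omega
            simp [hc]
          · -- value needs m more bits
            have hm1 : 1 ≤ m := by omega
            simp only [List.nil_append, ← hm]
            rw [if_neg hc]
            by_cases hr : ((t.drop z).length : Int) < m
            · -- truncated value bits: nothing more is emitted
              rw [phase3_partial (t.drop z) nums m ('1' :: t.take z) ['1'] prev hr]
              rw [hd, if_pos hr]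
              simp
            · rw [not_lt] at hr
              have hseg : (((t.drop z).take m.toNat).length : Int) = m := by
                simp only [List.length_take, List.length_drop]
                simp only [List.length_drop] at hr
                omega
              have hsplit2 : t.drop z = (t.drop z).take m.toNat ++ (t.drop z).drop m.toNat :=
                (List.take_append_drop _ _).symm
              have hfold3 : (t.drop z).foldl stepA
                  ⟨nums, false, 0, some m, '1' :: t.take z, ['1'], prev⟩
                  = ((t.drop z).drop m.toNat).foldl stepA
                      ⟨nums ++ [prev + binVal (['1'] ++ (t.drop z).take m.toNat)], true, 1,
                       none, [], ['1'], prev + binVal (['1'] ++ (t.drop z).take m.toNat)⟩ := by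
                conv_lhs => rw [hsplit2]
                exact phase3_full ((t.drop z).take m.toNat) ((t.drop z).drop m.toNat) nums m
                  ('1' :: t.take z) ['1'] prev hseg hm1
              rw [hfold3]
              have hih := ih ((t.drop z).drop m.toNat)
                (by simp only [List.length_drop]; omega)
                (fun c hc' => hbits c (List.mem_cons_of_mem _
                  (List.mem_of_mem_drop (List.mem_of_mem_drop hc')))) 0
                (nums ++ [prev + binVal (['1'] ++ (t.drop z).take m.toNat)])
                (prev + binVal (['1'] ++ (t.drop z).take m.toNat))
              simp only [Nat.cast_zero, add_zero, List.replicate_zero, List.nil_append] at hih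
              rw [hih]
              have hnlt : ¬ (((t.drop z).length : Int) < m) := by omega
              rw [hd, if_neg hnlt]
              simp [List.append_assoc]

theorem toDigitsCore_two_mem (fuel : Nat) : ∀ (n : Nat) (ds : List Char),
    (∀ c ∈ ds, c = '0' ∨ c = '1') →
    ∀ c ∈ Nat.toDigitsCore 2 fuel n ds, c = '0' ∨ c = '1' := by
  induction fuel with
  | zero => intro n ds hds c hc; exact hds c hc
  | succ k ih =>
    intro n ds hds c hc
    have hdigit : Nat.digitChar (n % 2) = '0' ∨ Nat.digitChar (n % 2) = '1' := by
      rcases Nat.mod_two_eq_zero_or_one n with h | h <;> simp [h, Nat.digitChar]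
    have hds' : ∀ d ∈ Nat.digitChar (n % 2) :: ds, d = '0' ∨ d = '1' := by
      intro d hd
      rcases List.mem_cons.mp hd with hd | hd
      · subst hd; exact hdigit
      · exact hds d hd
    rw [Nat.toDigitsCore] at hc
    by_cases h2 : n / 2 = 0
    · rw [if_pos h2] at hc
      exact hds' c hc
    · rw [if_neg h2] at hc
      exact ih (n / 2) (Nat.digitChar (n % 2) :: ds) hds' c hc

theorem toBinChars_mem (n : Int) (hn : 0 ≤ n) :
    ∀ c ∈ PySem.Int.toBinChars n, c = '0' ∨ c = '1' := by
  intro c hc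
  simp only [PySem.Int.toBinChars, if_neg (by omega : ¬ n < 0)] at hc
  exact toDigitsCore_two_mem _ _ _ (by simp) c hc

-- ===== VERDICT (by name: the statement is the Claim_ definition above) =====
theorem delta_decompress_spec : Claim_equal_delta_decompress := by
  intro n _ hpre
  unfold Spec_delta_decompress delta_decompress delta_decompress_alt
  have h := mainA ((PySem.Int.toBinChars n).reverse).length
    ((PySem.Int.toBinChars n).reverse) le_rfl
    (fun c hc => toBinChars_mem n hpre c (List.mem_reverse.mp hc)) 0 [] 0
  simpa using h
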